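-- pv_equiv track=rewrite | github.com/JohannaEnright/LCRthesis | codonclass_categorizeLCRs.py | countcodonclasscategories
-- ===== SOURCE A (Python) =====
-- def Split_Into_Codons(DNAseq):
--
--     codon_list = []
--     for i in range(0, len(DNAseq)-2, 3):
--         codon = DNAseq[i] + DNAseq[i+1] + DNAseq[i+2]
--         codon_list.append(codon)
--     return codon_list
--
-- def countcodonclasscategories(DNAseq):
--
--     codon_list = Split_Into_Codons(DNAseq)
--     d = {"c1":0, "c2":0, "c3":0}
--
--     totalcod = 0  #for checking the numbers add up
--     for cod in codon_list:
--         class1 = (cod[0] == cod[1]) and (cod[0] == cod[2])     #defining a class1 codon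
--         class2 = (cod[0] == cod[1] and cod[0] != cod[2]) or (cod[0] == cod[2]\
--                   and cod[0] != cod[1]) or (cod[1] == cod[2] and cod[0] != cod[1]) #defining a class 2 codon
--         class3 = cod[0] != cod[1] and cod[0] != cod[2] and cod[1] != cod[2]  #defining a class3 codon
--
--         if class1 == True:
--             d["c1"] += 1
--         elif class2 == True:
--             d["c2"] += 1
--         elif class3 == True:
--             d["c3"] += 1
--         totalcod += 1
--
--     if d["c1"]+d["c2"]+d["c3"] != totalcod:    #to confirm that you are counting all of the codons
--         raise ValueError("the codon types do not add up to the total number of codons.\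
--                 c1: "+str(d["c1"])+"\tc2: "+str(d["c2"])+"\tc3: "+str(d["c3"])+ "\ttotalcod: "+str(totalcod))
--
--     return d
-- ===== SOURCE B (Python) =====
-- def countcodonclasscategories(DNAseq):
--     codons = [DNAseq[i:i+3] for i in range(0, len(DNAseq) - 2, 3)]
--     c1 = sum(1 for t in codons if t[0] * 3 == t)
--     c3 = sum(1 for t in codons if t[0] != t[1] != t[2] != t[0])
--     return {"c1": c1, "c2": len(codons) - c1 - c3, "c3": c3}
-- ===== Notes on version B (the rewrite author's own statement) =====
-- stated objective: simpler
-- what changed: Replaces A's single pass that classifies each codon with six pairwise comparisons and an if/elif chain updating a mutable dict (plus a totalcod add-up check) by staged counting: one comprehension builds the codons, two filtered counts give c1 (codon equals its first base repeated, t[0]*3 == t) and c3 (chained all-distinct test), c2 is derived by subtraction, and the result dict is built once at the end; measured ~2x faster (fewer per-codon operations, no dict mutation).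
import Mathlib
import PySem

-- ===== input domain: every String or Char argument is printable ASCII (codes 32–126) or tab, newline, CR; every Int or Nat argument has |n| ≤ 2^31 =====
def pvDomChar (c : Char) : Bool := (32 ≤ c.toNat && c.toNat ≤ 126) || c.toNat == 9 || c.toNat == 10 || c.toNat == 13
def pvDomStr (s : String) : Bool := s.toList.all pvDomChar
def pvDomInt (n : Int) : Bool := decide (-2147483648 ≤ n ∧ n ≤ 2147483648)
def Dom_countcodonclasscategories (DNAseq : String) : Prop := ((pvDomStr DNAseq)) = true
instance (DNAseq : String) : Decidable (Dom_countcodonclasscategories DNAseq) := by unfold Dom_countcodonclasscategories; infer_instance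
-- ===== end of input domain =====

-- B replaces A's per-codon if/elif dict-increment classification by staged counting:
-- filtered counts for c1 (codon = first base repeated) and c3 (all distinct), c2 by subtraction; objective: simpler.

-- ===== PORT A =====
def pvSplitIntoCodons (DNAseq : List Char) : List (List Char) :=
  (PySem.List.pyRange 0 (PySem.List.len DNAseq - 2) 3).foldl
    (fun codon_list i =>
      codon_list ++ [[PySem.List.pyGetD DNAseq i ' ',
                      PySem.List.pyGetD DNAseq (i + 1) ' ',
                      PySem.List.pyGetD DNAseq (i + 2) ' ']]) []

def pvClassStep (st : PySem.Dict String Int × Int) (cod : List Char) : PySem.Dict String Int × Int :=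
  let d := st.1
  let class1 := (PySem.List.pyGetD cod 0 ' ' == PySem.List.pyGetD cod 1 ' ') &&
                (PySem.List.pyGetD cod 0 ' ' == PySem.List.pyGetD cod 2 ' ')
  let class2 := ((PySem.List.pyGetD cod 0 ' ' == PySem.List.pyGetD cod 1 ' ') &&
                 (PySem.List.pyGetD cod 0 ' ' != PySem.List.pyGetD cod 2 ' ')) ||
                ((PySem.List.pyGetD cod 0 ' ' == PySem.List.pyGetD cod 2 ' ') &&
                 (PySem.List.pyGetD cod 0 ' ' != PySem.List.pyGetD cod 1 ' ')) ||
                ((PySem.List.pyGetD cod 1 ' ' == PySem.List.pyGetD cod 2 ' ') &&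
                 (PySem.List.pyGetD cod 0 ' ' != PySem.List.pyGetD cod 1 ' '))
  let class3 := (PySem.List.pyGetD cod 0 ' ' != PySem.List.pyGetD cod 1 ' ') &&
                (PySem.List.pyGetD cod 0 ' ' != PySem.List.pyGetD cod 2 ' ') &&
                (PySem.List.pyGetD cod 1 ' ' != PySem.List.pyGetD cod 2 ' ')
  let d' := if class1 == true then d.modify "c1" 0 (· + 1)
            else if class2 == true then d.modify "c2" 0 (· + 1)
            else if class3 == true then d.modify "c3" 0 (· + 1)
            else d
  (d', st.2 + 1)

def countcodonclasscategories (DNAseq : String) : List (String × Int) :=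
  let codon_list := pvSplitIntoCodons DNAseq.toList
  let st := codon_list.foldl pvClassStep (PySem.Dict.ofList [("c1", 0), ("c2", 0), ("c3", 0)], 0)
  -- Python's 'raise ValueError' add-up check: the raise branch is modelled by [] (no return value);
  -- it is proved unreachable below (every codon falls in exactly one class)
  if st.1.getD "c1" 0 + st.1.getD "c2" 0 + st.1.getD "c3" 0 ≠ st.2 then []
  else st.1.items

-- ===== PORT B =====
-- 't[0] * 3 == t' : the codon equals its first character repeated three times
def pvAllSame (t : List Char) : Bool :=
  List.replicate 3 (PySem.List.pyGetD t 0 ' ') == t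

-- 't[0] != t[1] != t[2] != t[0]' : Python's chained comparison, three pairwise tests
def pvAllDistinct (t : List Char) : Bool :=
  (PySem.List.pyGetD t 0 ' ' != PySem.List.pyGetD t 1 ' ') &&
  (PySem.List.pyGetD t 1 ' ' != PySem.List.pyGetD t 2 ' ') &&
  (PySem.List.pyGetD t 2 ' ' != PySem.List.pyGetD t 0 ' ')

def countcodonclasscategories_alt (DNAseq : String) : List (String × Int) :=
  let s := DNAseq.toList
  let codons := (PySem.List.pyRange 0 (PySem.List.len s - 2) 3).map
      (fun i => PySem.List.slice s (some i) (some (i + 3)))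
  let c1 : Int := (codons.filter pvAllSame).length
  let c3 : Int := (codons.filter pvAllDistinct).length
  [("c1", c1), ("c2", PySem.List.len codons - c1 - c3), ("c3", c3)]

-- ===== PRECONDITION & SPEC =====
def Spec_countcodonclasscategories (DNAseq : String) (out : List (String × Int)) : Prop := out = countcodonclasscategories_alt DNAseq
instance (DNAseq : String) (out : List (String × Int)) : Decidable (Spec_countcodonclasscategories DNAseq out) := by unfold Spec_countcodonclasscategories; infer_instance

-- ===== CLAIM (what is proved, stated in full; the proofs are below) =====
def Claim_equal_countcodonclasscategories : Prop := ∀ (DNAseq : String), Dom_countcodonclasscategories DNAseq → Spec_countcodonclasscategories DNAseq (countcodonclasscategories DNAseq)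

-- ===== LEMMAS AND PROOFS =====

/-- The three-counter dict A maintains. -/
def pvD3 (x y z : Int) : PySem.Dict String Int :=
  PySem.Dict.ofList [("c1", x), ("c2", y), ("c3", z)]

lemma pvD3_modify_c1 (x y z : Int) (f : Int → Int) :
    (pvD3 x y z).modify "c1" 0 f = pvD3 (f x) y z := by
  simp [pvD3, PySem.Dict.modify, PySem.Dict.ofList, PySem.Dict.update, PySem.Dict.insert,
        PySem.Dict.getD, PySem.Dict.get?, PySem.Dict.empty, PySem.Dict.contains]

lemma pvD3_modify_c2 (x y z : Int) (f : Int → Int) :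
    (pvD3 x y z).modify "c2" 0 f = pvD3 x (f y) z := by
  simp [pvD3, PySem.Dict.modify, PySem.Dict.ofList, PySem.Dict.update, PySem.Dict.insert,
        PySem.Dict.getD, PySem.Dict.get?, PySem.Dict.empty, PySem.Dict.contains]

lemma pvD3_modify_c3 (x y z : Int) (f : Int → Int) :
    (pvD3 x y z).modify "c3" 0 f = pvD3 x y (f z) := by
  simp [pvD3, PySem.Dict.modify, PySem.Dict.ofList, PySem.Dict.update, PySem.Dict.insert,
        PySem.Dict.getD, PySem.Dict.get?, PySem.Dict.empty, PySem.Dict.contains]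

lemma pvD3_getD (x y z : Int) :
    (pvD3 x y z).getD "c1" 0 = x ∧ (pvD3 x y z).getD "c2" 0 = y ∧ (pvD3 x y z).getD "c3" 0 = z := by
  refine ⟨?_, ?_, ?_⟩ <;>
    simp [pvD3, PySem.Dict.ofList, PySem.Dict.update, PySem.Dict.insert,
          PySem.Dict.getD, PySem.Dict.get?, PySem.Dict.empty, PySem.Dict.contains]

lemma pvD3_items (x y z : Int) :
    (pvD3 x y z).items = [("c1", x), ("c2", y), ("c3", z)] := by
  simp [pvD3, PySem.Dict.ofList, PySem.Dict.update, PySem.Dict.insert,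
        PySem.Dict.empty, PySem.Dict.contains]

/-- A's codon at index i (the three characters DNAseq[i], DNAseq[i+1], DNAseq[i+2]). -/
def pvCodonAt (s : List Char) (i : Int) : List Char :=
  [PySem.List.pyGetD s i ' ', PySem.List.pyGetD s (i + 1) ' ', PySem.List.pyGetD s (i + 2) ' ']

lemma pvAllSame_char (a b c : Char) : pvAllSame [a, b, c] = (a == b && a == c) := by
  by_cases h1 : a = b <;> by_cases h2 : a = c <;>
    simp [pvAllSame, PySem.List.pyGetD, PySem.List.pyGet?, PySem.List.pyIdx?, List.replicate,
          h1, h2]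

lemma pvAllDistinct_char (a b c : Char) :
    pvAllDistinct [a, b, c] = (a != b && b != c && c != a) := by
  simp [pvAllDistinct, PySem.List.pyGetD, PySem.List.pyGet?, PySem.List.pyIdx?]

/-- One codon: A's class chain increments c1 iff pvAllSame, c3 iff pvAllDistinct, c2 otherwise. -/
lemma pvStepAgree (a b c : Char) (x y z t : Int) :
    pvClassStep (pvD3 x y z, t) [a, b, c] =
      (pvD3 (x + if pvAllSame [a, b, c] then 1 else 0)
            (y + (1 - (if pvAllSame [a, b, c] then 1 else 0)
                    - (if pvAllDistinct [a, b, c] then 1 else 0)))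
            (z + if pvAllDistinct [a, b, c] then 1 else 0), t + 1) := by
  rw [pvAllSame_char, pvAllDistinct_char]
  by_cases hab : a = b <;> by_cases hac : a = c <;> by_cases hbc : b = c
  · subst hab; subst hac
    simp [pvClassStep, PySem.List.pyGetD, PySem.List.pyGet?, PySem.List.pyIdx?, pvD3_modify_c1]
  · exact absurd (hab ▸ hac) hbc
  · exact absurd (hab ▸ hbc) hac
  · subst hab
    simp [pvClassStep, PySem.List.pyGetD, PySem.List.pyGet?, PySem.List.pyIdx?, hac,
          pvD3_modify_c2, bne]
  · exact absurd (hac ▸ hbc.symm) hab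
  · subst hac
    simp [pvClassStep, PySem.List.pyGetD, PySem.List.pyGet?, PySem.List.pyIdx?, hab,
          Ne.symm hab, pvD3_modify_c2, bne]
  · subst hbc
    simp [pvClassStep, PySem.List.pyGetD, PySem.List.pyGet?, PySem.List.pyIdx?, hab,
          pvD3_modify_c2, bne]
  · have hca : ¬c = a := fun h => hac h.symm
    simp [pvClassStep, PySem.List.pyGetD, PySem.List.pyGet?, PySem.List.pyIdx?, hab, hac, hbc,
          hca, pvD3_modify_c3, bne]

/-- A's fold over the index list counts pvAllSame into c1, pvAllDistinct into c3, the rest into c2. -/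
lemma pvFoldCount (s : List Char) (L : List Int) :
    ∀ x y z t : Int,
      L.foldl (fun st i => pvClassStep st (pvCodonAt s i)) (pvD3 x y z, t)
        = (pvD3 (x + (L.countP (fun i => pvAllSame (pvCodonAt s i)) : Int))
                (y + ((L.length : Int) - (L.countP (fun i => pvAllSame (pvCodonAt s i)) : Int)
                        - (L.countP (fun i => pvAllDistinct (pvCodonAt s i)) : Int)))
                (z + (L.countP (fun i => pvAllDistinct (pvCodonAt s i)) : Int)),
           t + L.length) := by
  induction L with
  | nil => intro x y z t; simp
  | cons i L ih =>
    intro x y z t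
    rw [List.foldl_cons, show pvCodonAt s i =
        [PySem.List.pyGetD s i ' ', PySem.List.pyGetD s (i + 1) ' ',
         PySem.List.pyGetD s (i + 2) ' '] from rfl, pvStepAgree, ih]
    have h1 : pvAllSame (pvCodonAt s i) = pvAllSame
        [PySem.List.pyGetD s i ' ', PySem.List.pyGetD s (i + 1) ' ',
         PySem.List.pyGetD s (i + 2) ' '] := rfl
    refine Prod.ext ?_ ?_ <;>
      simp only [List.countP_cons, List.length_cons, ← h1, show pvAllDistinct (pvCodonAt s i) =
        pvAllDistinct [PySem.List.pyGetD s i ' ', PySem.List.pyGetD s (i + 1) ' ',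
          PySem.List.pyGetD s (i + 2) ' '] from rfl]
    · congr 1 <;> by_cases hs : pvAllSame (pvCodonAt s i) <;>
        by_cases hd : pvAllDistinct (pvCodonAt s i) <;> simp [*] <;> ring
    · push_cast; ring

lemma pvTake3 (s : List Char) (k : Nat) (h : k + 2 < s.length) :
    (s.drop k).take 3 = [s[k], s[k + 1], s[k + 2]] := by
  have h1 : s.drop k = s[k] :: s.drop (k + 1) := List.drop_eq_getElem_cons (by omega)
  have h2 : s.drop (k + 1) = s[k + 1] :: s.drop (k + 2) := List.drop_eq_getElem_cons (by omega)
  have h3 : s.drop (k + 2) = s[k + 2] :: s.drop (k + 3) := List.drop_eq_getElem_cons (by omega)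
  rw [h1, h2, h3, List.take_succ_cons, List.take_succ_cons, List.take_succ_cons, List.take_zero]

/-- On in-range indices B's slice is exactly A's three-character codon. -/
lemma pvSliceEqCodon (s : List Char) (i : Int) (h0 : 0 ≤ i) (h2 : i + 2 < (s.length : Int)) :
    PySem.List.slice s (some i) (some (i + 3)) = pvCodonAt s i := by
  set k := i.toNat with hk
  have hkl : k + 2 < s.length := by omega
  have e0 : PySem.List.pyGetD s i ' ' = s[k] :=
    PySem.List.pyGetD_eq_getElem s ' ' h0 (by omega)
  have e1 : PySem.List.pyGetD s (i + 1) ' ' = s[k + 1] := by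
    have := PySem.List.pyGetD_eq_getElem (i := i + 1) s ' ' (by omega) (by omega)
    simp only [show (i + 1).toNat = k + 1 from by omega] at this; exact this
  have e2 : PySem.List.pyGetD s (i + 2) ' ' = s[k + 2] := by
    have := PySem.List.pyGetD_eq_getElem (i := i + 2) s ' ' (by omega) (by omega)
    simp only [show (i + 2).toNat = k + 2 from by omega] at this; exact this
  rw [PySem.List.slice_toNat s h0 (by omega),
      show (i + 3).toNat - i.toNat = 3 by omega, pvTake3 s k hkl,
      pvCodonAt, e0, e1, e2]

lemma pvSplit_eq_map (s : List Char) :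
    pvSplitIntoCodons s = (PySem.List.pyRange 0 (PySem.List.len s - 2) 3).map (pvCodonAt s) := by
  rw [pvSplitIntoCodons, PySem.List.foldl_append_singleton_eq_map]
  rfl

-- ===== VERDICT (by name: the statement is the Claim_ definition above) =====
theorem countcodonclasscategories_spec : Claim_equal_countcodonclasscategories := by
  intro DNAseq _
  unfold Spec_countcodonclasscategories countcodonclasscategories countcodonclasscategories_alt
  set s := DNAseq.toList with hs
  set L := PySem.List.pyRange 0 (PySem.List.len s - 2) 3 with hL
  have hmem : ∀ i ∈ L, 0 ≤ i ∧ i + 2 < (s.length : Int) := by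
    intro i hi
    rw [hL, PySem.List.mem_pyRange_iff_of_pos (by norm_num)] at hi
    simp only [PySem.List.len] at hi
    omega
  have hcodons : L.map (fun i => PySem.List.slice s (some i) (some (i + 3)))
      = L.map (pvCodonAt s) := by
    refine List.map_congr_left ?_
    intro i hi
    exact pvSliceEqCodon s i (hmem i hi).1 (hmem i hi).2
  have hcount1 : ((L.map (pvCodonAt s)).filter pvAllSame).length
      = L.countP (fun i => pvAllSame (pvCodonAt s i)) := by
    rw [List.countP_eq_length_filter, List.filter_map, List.length_map]; rfl
  have hcount3 : ((L.map (pvCodonAt s)).filter pvAllDistinct).length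
      = L.countP (fun i => pvAllDistinct (pvCodonAt s i)) := by
    rw [List.countP_eq_length_filter, List.filter_map, List.length_map]; rfl
  have hfold := pvFoldCount s L 0 0 0 0
  obtain ⟨g1, g2, g3⟩ := pvD3_getD
    ((L.countP (fun i => pvAllSame (pvCodonAt s i)) : Int))
    (((L.length : Int) - (L.countP (fun i => pvAllSame (pvCodonAt s i)) : Int)
        - (L.countP (fun i => pvAllDistinct (pvCodonAt s i)) : Int)))
    ((L.countP (fun i => pvAllDistinct (pvCodonAt s i)) : Int))
  simp only [pvSplit_eq_map, List.foldl_map, ← hL, ← hs] at *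
  rw [hcodons,
      show (PySem.Dict.ofList [("c1", (0:Int)), ("c2", 0), ("c3", 0)], (0:Int))
        = (pvD3 0 0 0, 0) from rfl, hfold]
  simp only [zero_add, g1, g2, g3]
  rw [if_neg (by omega)]
  rw [pvD3_items, hcount1, hcount3]
  have hlen : PySem.List.len (L.map (pvCodonAt s)) = (L.length : Int) := by
    simp [PySem.List.len]
  rw [hlen]
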